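-- pv_equiv track=rewrite | github.com/AXI0MH1VE/Lex-Link | merkle-entropy-service/mes/safety.py | validate_data_blocks
-- ===== SOURCE A (Python) =====
-- from typing import List, Optional, Dict, Tuple
--
-- class SafetyConfig:
--     """Safety configuration parameters."""
--
--     # Input size limits (prevent DoS)
--     MAX_DATA_BLOCKS = 10000
--     MAX_BLOCK_SIZE = 10 * 1024 * 1024  # 10MB per block
--     MAX_TOTAL_SIZE = 100 * 1024 * 1024  # 100MB total
--
--     # Rate limiting
--     MAX_REQUESTS_PER_MINUTE = 100
--
--     # Operator approval required for operations
--     REQUIRES_APPROVAL = False  # Read-only operations don't require approval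
--     APPROVAL_TIMEOUT_SECONDS = 300  # 5 minutes
--
-- def validate_data_blocks(data_blocks: List[str]) -> Tuple[bool, Optional[str]]:
--     """
--     Validate data blocks for safety.
--
--     Returns:
--         (is_valid, error_message)
--     """
--     # Check count
--     if len(data_blocks) > SafetyConfig.MAX_DATA_BLOCKS:
--         return False, f"Too many data blocks: {len(data_blocks)} > {SafetyConfig.MAX_DATA_BLOCKS}"
--
--     # Check individual block sizes
--     total_size = 0
--     for i, block in enumerate(data_blocks):
--         block_size = len(block.encode('utf-8'))
--         if block_size > SafetyConfig.MAX_BLOCK_SIZE: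
--             return False, f"Block {i} too large: {block_size} > {SafetyConfig.MAX_BLOCK_SIZE}"
--         total_size += block_size
--
--     # Check total size
--     if total_size > SafetyConfig.MAX_TOTAL_SIZE:
--         return False, f"Total size too large: {total_size} > {SafetyConfig.MAX_TOTAL_SIZE}"
--
--     return True, None
-- ===== SOURCE B (Python) =====
-- class SafetyConfig:
--     MAX_DATA_BLOCKS = 10000
--     MAX_BLOCK_SIZE = 10 * 1024 * 1024
--     MAX_TOTAL_SIZE = 100 * 1024 * 1024
--
--
-- def validate_data_blocks(data_blocks):
--     if len(data_blocks) > SafetyConfig.MAX_DATA_BLOCKS: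
--         return False, f"Too many data blocks: {len(data_blocks)} > {SafetyConfig.MAX_DATA_BLOCKS}"
--
--     sizes = [len(b.encode('utf-8')) for b in data_blocks]
--
--     bad = next(((i, s) for i, s in enumerate(sizes) if s > SafetyConfig.MAX_BLOCK_SIZE), None)
--     if bad is not None:
--         i, s = bad
--         return False, f"Block {i} too large: {s} > {SafetyConfig.MAX_BLOCK_SIZE}"
--
--     total = sum(sizes)
--     if total > SafetyConfig.MAX_TOTAL_SIZE:
--         return False, f"Total size too large: {total} > {SafetyConfig.MAX_TOTAL_SIZE}"
--
--     return True, None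
-- ===== Notes on version B (the rewrite author's own statement) =====
-- stated objective: alternative
-- what changed: Replaces A's single accumulate-and-check loop (index, running total, early return) with a size-table build followed by two separate queries: a first-violation search over the enumerated table and a sum-based total check.
import Mathlib
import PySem

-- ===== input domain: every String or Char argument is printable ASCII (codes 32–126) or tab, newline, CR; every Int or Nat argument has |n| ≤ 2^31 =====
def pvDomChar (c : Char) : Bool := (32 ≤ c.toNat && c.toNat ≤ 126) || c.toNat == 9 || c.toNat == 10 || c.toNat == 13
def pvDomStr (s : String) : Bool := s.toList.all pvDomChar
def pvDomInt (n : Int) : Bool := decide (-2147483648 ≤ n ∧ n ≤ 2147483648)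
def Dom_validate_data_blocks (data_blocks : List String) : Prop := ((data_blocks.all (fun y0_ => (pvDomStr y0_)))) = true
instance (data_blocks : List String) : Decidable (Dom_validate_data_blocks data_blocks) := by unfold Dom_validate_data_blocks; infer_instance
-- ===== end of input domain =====

-- B rebuilds the check as a byte-size table plus two separate queries (first-violation
-- search, then a sum check) instead of A's single accumulate-and-check loop; alternative
-- decomposition, same cost.


-- ===== PORT A =====
-- len(block.encode('utf-8')): UTF-8 byte length of the string (exact: sum of per-char UTF-8 sizes)
def pvByteLen (s : String) : Int := ((s.toList.map (fun c => (c.utf8Size : Int))).sum)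

def pvBlockMsg (i : Int) (bs : Int) : String :=
  "Block " ++ PySem.Int.toStr i ++ " too large: " ++ PySem.Int.toStr bs ++ " > " ++ PySem.Int.toStr 10485760

def pvTotalMsg (t : Int) : String :=
  "Total size too large: " ++ PySem.Int.toStr t ++ " > " ++ PySem.Int.toStr 104857600

def pvCountMsg (n : Int) : String :=
  "Too many data blocks: " ++ PySem.Int.toStr n ++ " > " ++ PySem.Int.toStr 10000

-- A's loop: index, running total, early return on an oversized block
def pvLoopA : List String → Int → Int → Bool × Option String
  | [], _, total =>
      if total > 104857600 then (false, some (pvTotalMsg total)) else (true, none)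
  | b :: rest, i, total =>
      let bs := pvByteLen b
      if bs > 10485760 then (false, some (pvBlockMsg i bs))
      else pvLoopA rest (i + 1) (total + bs)

def validate_data_blocks (data_blocks : List String) : Bool × Option String :=
  if (data_blocks.length : Int) > 10000 then
    (false, some (pvCountMsg (data_blocks.length : Int)))
  else
    pvLoopA data_blocks 0 0

-- ===== PORT B =====
def validate_data_blocks_alt (data_blocks : List String) : Bool × Option String :=
  if (data_blocks.length : Int) > 10000 then
    (false, some (pvCountMsg (data_blocks.length : Int)))
  else
    let sizes := data_blocks.map pvByteLen
    match (PySem.List.enumerate sizes 0).find? (fun p => decide (p.2 > 10485760)) with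
    | some (i, s) => (false, some (pvBlockMsg i s))
    | none =>
        let total := sizes.sum
        if total > 104857600 then (false, some (pvTotalMsg total)) else (true, none)

-- ===== PRECONDITION & SPEC =====
def Spec_validate_data_blocks (data_blocks : List String) (out : Bool × Option String) : Prop := out = validate_data_blocks_alt data_blocks
instance (data_blocks : List String) (out : Bool × Option String) : Decidable (Spec_validate_data_blocks data_blocks out) := by unfold Spec_validate_data_blocks; infer_instance

-- ===== CLAIM (what is proved, stated in full; the proofs are below) =====
def Claim_equal_validate_data_blocks : Prop := ∀ (data_blocks : List String), Dom_validate_data_blocks data_blocks → Spec_validate_data_blocks data_blocks (validate_data_blocks data_blocks)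

-- ===== LEMMAS AND PROOFS =====
theorem pvLoopA_eq (xs : List String) : ∀ (i total : Int),
    pvLoopA xs i total =
      match (PySem.List.enumerate (xs.map pvByteLen) i).find? (fun p => decide (p.2 > 10485760)) with
      | some (j, s) => (false, some (pvBlockMsg j s))
      | none =>
          if total + (xs.map pvByteLen).sum > 104857600 then
            (false, some (pvTotalMsg (total + (xs.map pvByteLen).sum)))
          else (true, none) := by
  induction xs with
  | nil => intro i total; simp [pvLoopA]
  | cons b rest ih =>
      intro i total
      simp only [List.map_cons, PySem.List.enumerate_cons, List.find?_cons]
      by_cases h : pvByteLen b > 10485760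
      · simp [pvLoopA, h]
      · simp only [pvLoopA, h]
        have := ih (i + 1) (total + pvByteLen b)
        simp [this, add_assoc]

-- ===== VERDICT (by name: the statement is the Claim_ definition above) =====
theorem validate_data_blocks_spec : Claim_equal_validate_data_blocks := by
  intro xs _
  unfold Spec_validate_data_blocks validate_data_blocks validate_data_blocks_alt
  by_cases h : (xs.length : Int) > 10000
  · simp [h]
  · simp only [h]
    have := pvLoopA_eq xs 0 0
    simpa using this
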